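-- pv_equiv track=rewrite | github.com/MukulRay1603/Empath-RAG | eval/prepare_karthik_dataset.py | _split_for_id
-- ===== SOURCE A (Python) =====
-- def _split_for_id(identifier: str) -> str:
--     digits = "".join(ch for ch in identifier if ch.isdigit())
--     value = int(digits or "0")
--     if value % 10 in {0, 1}:
--         return "test"
--     if value % 10 == 2:
--         return "dev"
--     return "train"
-- ===== SOURCE B (Python) =====
-- def _split_for_id(identifier: str) -> str:
--     # Only the last digit decides the bucket: scan from the right, default '0'.
--     last = next((ch for ch in reversed(identifier) if ch.isdigit()), "0")
--     d = int(last)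
--     if d <= 1:
--         return "test"
--     if d == 2:
--         return "dev"
--     return "train"
-- ===== Notes on version B (the rewrite author's own statement) =====
-- stated objective: simpler
-- what changed: Instead of building the full digit string and converting it all to an int, B scans the identifier from the right with an early exit for the last digit character (default '0') and branches on that single digit.
import Mathlib
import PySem

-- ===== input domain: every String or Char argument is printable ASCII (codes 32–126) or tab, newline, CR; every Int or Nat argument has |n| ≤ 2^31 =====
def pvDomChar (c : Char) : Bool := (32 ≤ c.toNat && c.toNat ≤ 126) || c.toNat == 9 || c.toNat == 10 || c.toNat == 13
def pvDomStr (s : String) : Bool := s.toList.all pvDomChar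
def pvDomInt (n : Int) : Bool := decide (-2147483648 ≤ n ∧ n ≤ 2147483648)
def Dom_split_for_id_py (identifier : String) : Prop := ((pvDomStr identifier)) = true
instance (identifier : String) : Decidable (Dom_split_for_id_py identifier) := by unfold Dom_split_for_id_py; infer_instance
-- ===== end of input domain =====

-- B replaces A's build-the-whole-digit-string-then-int pipeline by an early-exit reverse scan
-- for the last digit character (simpler decomposition; same worst-case cost).


-- ===== PORT A =====
-- int(digits or "0"): here `digits` consists only of ASCII '0'-'9', on which Python's int()
-- is exactly the base-10 positional value; ported by hand as that fold (exact on this input).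
def pvIntOfDigits (ds : List Char) : Int :=
  ds.foldl (fun a c => 10 * a + ((c.toNat : Int) - 48)) 0

def split_for_id_py (identifier : String) : String :=
  let digits : List Char :=
    identifier.toList.foldl (fun acc ch => if PySem.Chars.isdigit ch then acc ++ [ch] else acc) []
  let value : Int := pvIntOfDigits (if digits.isEmpty then ['0'] else digits)
  if PySem.Int.mod value 10 = 0 ∨ PySem.Int.mod value 10 = 1 then "test"
  else if PySem.Int.mod value 10 = 2 then "dev"
  else "train"

-- ===== PORT B =====
def split_for_id_py_alt (identifier : String) : String :=
  let last : Char := (identifier.toList.reverse.find? PySem.Chars.isdigit).getD '0'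
  let d : Int := (last.toNat : Int) - 48   -- int(last): last is a single ASCII digit
  if d ≤ 1 then "test" else if d = 2 then "dev" else "train"

-- ===== PRECONDITION & SPEC =====
def Spec_split_for_id_py (identifier : String) (out : String) : Prop := out = split_for_id_py_alt identifier
instance (identifier : String) (out : String) : Decidable (Spec_split_for_id_py identifier out) := by unfold Spec_split_for_id_py; infer_instance

-- ===== CLAIM (what is proved, stated in full; the proofs are below) =====
def Claim_equal_split_for_id_py : Prop := ∀ (identifier : String), Dom_split_for_id_py identifier → Spec_split_for_id_py identifier (split_for_id_py identifier)

-- ===== LEMMAS AND PROOFS =====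

-- An ASCII digit character has code 48..57.
theorem pv_isdigit_bounds {c : Char} (h : PySem.Chars.isdigit c = true) :
    48 ≤ c.toNat ∧ c.toNat ≤ 57 := by
  simp only [PySem.Chars.isdigit, Bool.and_eq_true, decide_eq_true_eq, Char.le_def] at h
  obtain ⟨h1, h2⟩ := h
  exact ⟨h1, h2⟩

-- The last digit of the positional value of ds ++ [c].
theorem pv_value_concat (ds : List Char) (c : Char) :
    pvIntOfDigits (ds ++ [c]) = 10 * pvIntOfDigits ds + ((c.toNat : Int) - 48) := by
  simp [pvIntOfDigits, List.foldl_append]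

-- The first digit of the reversed list is the last element of the filtered list.
theorem pv_find_reverse (l : List Char) :
    l.reverse.find? PySem.Chars.isdigit = (l.filter PySem.Chars.isdigit).getLast? := by
  rw [← List.head?_filter, List.filter_reverse, List.head?_reverse]

-- ===== VERDICT (by name: the statement is the Claim_ definition above) =====
theorem split_for_id_py_spec : Claim_equal_split_for_id_py := by
  intro identifier _
  unfold Spec_split_for_id_py split_for_id_py split_for_id_py_alt
  simp only [PySem.List.foldl_append_if_eq_filter, List.nil_append, pv_find_reverse]
  rcases (identifier.toList.filter PySem.Chars.isdigit).eq_nil_or_concat with hF | ⟨ds, c, hF⟩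
  · rw [hF]
    decide
  · rw [List.concat_eq_append] at hF
    rw [hF]
    have hc : PySem.Chars.isdigit c = true := by
      have : c ∈ identifier.toList.filter PySem.Chars.isdigit := by
        rw [hF]; simp
      exact (List.mem_filter.mp this).2
    obtain ⟨hlo, hhi⟩ := pv_isdigit_bounds hc
    rw [List.getLast?_concat, Option.getD_some]
    have hE : (ds ++ [c]).isEmpty = false := by simp
    rw [hE]
    simp only [Bool.false_eq_true, if_false]
    rw [pv_value_concat]
    set v := pvIntOfDigits ds with hv
    rw [PySem.Int.mod_eq_emod_of_pos (by norm_num)]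
    have hmod : (10 * v + ((c.toNat : Int) - 48)) % 10 = (c.toNat : Int) - 48 := by omega
    rw [hmod]
    split_ifs with h1 h2 h3 h4 h5 <;> first | rfl | omega
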